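-- pv_equiv track=rewrite | github.com/Jovinpthomas/Code-Review | code_review.py | _get_nearest_function
-- ===== SOURCE A (Python) =====
-- def _get_nearest_function(full_text, chunk_text, func_dict):
--     chunk_start = full_text.find(chunk_text[:20])  # crude match
--     closest_offset = -1
--     closest_name = "unknown"
--     for offset in sorted(func_dict.keys()):
--         if offset <= chunk_start:
--             closest_offset = offset
--             closest_name = func_dict[offset]
--         else:
--             break
--     return closest_name
-- ===== SOURCE B (Python) =====
-- def _get_nearest_function(full_text, chunk_text, func_dict):
--     chunk_start = full_text.find(chunk_text[:20])  # crude match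
--     candidates = [o for o in func_dict if o <= chunk_start]
--     if not candidates:
--         return "unknown"
--     return func_dict[max(candidates)]
-- ===== Notes on version B (the rewrite author's own statement) =====
-- stated objective: faster
-- what changed: replaces sorting all keys and scanning with a break by a single filter of the keys to those <= chunk_start followed by taking their max
import Mathlib
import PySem

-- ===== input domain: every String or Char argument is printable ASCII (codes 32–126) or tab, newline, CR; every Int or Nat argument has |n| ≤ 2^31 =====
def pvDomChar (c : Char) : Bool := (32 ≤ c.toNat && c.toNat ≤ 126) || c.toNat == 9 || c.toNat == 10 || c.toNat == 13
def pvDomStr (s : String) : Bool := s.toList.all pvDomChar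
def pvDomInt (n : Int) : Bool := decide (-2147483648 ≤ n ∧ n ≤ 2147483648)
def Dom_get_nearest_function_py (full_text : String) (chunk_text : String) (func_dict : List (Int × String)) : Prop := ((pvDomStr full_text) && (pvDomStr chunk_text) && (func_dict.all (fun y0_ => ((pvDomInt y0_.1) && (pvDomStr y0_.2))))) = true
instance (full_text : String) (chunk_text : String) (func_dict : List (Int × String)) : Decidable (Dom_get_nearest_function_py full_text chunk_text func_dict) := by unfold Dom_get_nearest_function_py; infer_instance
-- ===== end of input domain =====

-- B replaces A's sort-then-scan-with-break by a single filter of the keys plus max selection (simpler, no sort).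


-- ===== PORT A =====
-- the for-loop over sorted keys, with its break; carries (closest_offset, closest_name).
-- func_dict[offset] is d.getD offset "" — the key is always a member of d.keys here, so no KeyError can occur.
def goA (d : PySem.Dict Int String) (cs : Int) : List Int → Int → String → Int × String
  | [], co, cn => (co, cn)
  | o :: t, co, cn => if o ≤ cs then goA d cs t o (d.getD o "") else (co, cn)

def get_nearest_function_py (full_text : String) (chunk_text : String) (func_dict : List (Int × String)) : String :=
  let d := PySem.Dict.ofList func_dict
  let chunk_start := PySem.Str.find full_text (PySem.Str.slice chunk_text none (some 20))
  (goA d chunk_start (PySem.List.sorted d.keys (fun x => x) false) (-1) "unknown").2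

-- ===== PORT B =====
def get_nearest_function_py_alt (full_text : String) (chunk_text : String) (func_dict : List (Int × String)) : String :=
  let d := PySem.Dict.ofList func_dict
  let chunk_start := PySem.Str.find full_text (PySem.Str.slice chunk_text none (some 20))
  let candidates := d.keys.filter (fun o => decide (o ≤ chunk_start))
  match PySem.List.max? candidates (fun x => x) with
  | none => "unknown"
  | some m => d.getD m "unknown"

-- ===== PRECONDITION & SPEC =====
def Spec_get_nearest_function_py (full_text : String) (chunk_text : String) (func_dict : List (Int × String)) (out : String) : Prop := out = get_nearest_function_py_alt full_text chunk_text func_dict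
instance (full_text : String) (chunk_text : String) (func_dict : List (Int × String)) (out : String) : Decidable (Spec_get_nearest_function_py full_text chunk_text func_dict out) := by unfold Spec_get_nearest_function_py; infer_instance

-- ===== CLAIM (what is proved, stated in full; the proofs are below) =====
def Claim_equal_get_nearest_function_py : Prop := ∀ (full_text : String) (chunk_text : String) (func_dict : List (Int × String)), Dom_get_nearest_function_py full_text chunk_text func_dict → Spec_get_nearest_function_py full_text chunk_text func_dict (get_nearest_function_py full_text chunk_text func_dict)

-- ===== LEMMAS AND PROOFS =====

-- a member's getD does not depend on the default
theorem getD_default_irrel (d : PySem.Dict Int String) (m : Int) (hm : m ∈ d.keys) (a b : String) :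
    d.getD m a = d.getD m b := by
  rw [PySem.Dict.getD_eq_get?_getD, PySem.Dict.getD_eq_get?_getD]
  cases h : d.get? m with
  | none => exact absurd hm ((PySem.Dict.get?_eq_none_iff_not_mem_keys d m).mp h)
  | some v => simp

-- max? (with the identity key) is permutation-invariant on Int lists
theorem max?_perm (xs ys : List Int) (h : xs.Perm ys) :
    PySem.List.max? xs (fun x => x) = PySem.List.max? ys (fun x => x) := by
  cases hx : PySem.List.max? xs (fun x => x) with
  | none =>
    rw [PySem.List.max?_eq_none_iff] at hx
    subst hx
    rw [(PySem.List.max?_eq_none_iff ys (fun x => x)).mpr (h.nil_eq).symm]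
  | some m =>
    cases hy : PySem.List.max? ys (fun x => x) with
    | none =>
      rw [PySem.List.max?_eq_none_iff] at hy
      subst hy
      rw [(PySem.List.max?_eq_none_iff xs (fun x => x)).mpr h.symm.nil_eq.symm] at hx
      exact absurd hx (by simp)
    | some m' =>
      have h1 := PySem.List.max?_mem hx
      have h2 := PySem.List.max?_mem hy
      have l1 := PySem.List.max?_isMax hx m' (h.symm.mem_iff.mp h2)
      have l2 := PySem.List.max?_isMax hy m (h.mem_iff.mp h1)
      simp only [Option.some.injEq]
      exact le_antisymm l2 l1

-- the loop over a strictly increasing list = lookup of the max of its ≤-cs filter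
theorem goA_eq (d : PySem.Dict Int String) (cs : Int) (ks : List Int)
    (hp : ks.Pairwise (· < ·)) (co : Int) (cn : String) :
    (goA d cs ks co cn).2 =
      match PySem.List.max? (ks.filter (fun o => decide (o ≤ cs))) (fun x => x) with
      | none => cn
      | some m => d.getD m "" := by
  induction ks generalizing co cn with
  | nil => simp [goA, PySem.List.max?]
  | cons o t ih =>
    rw [List.pairwise_cons] at hp
    by_cases ho : o ≤ cs
    · simp only [goA, if_pos ho]
      rw [List.filter_cons_of_pos (by simpa using ho), ih hp.2]
      cases hft : PySem.List.max? (t.filter (fun o => decide (o ≤ cs))) (fun x => x) with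
      | none =>
        have hnil := (PySem.List.max?_eq_none_iff _ _).mp hft
        rw [hnil]
        simp [PySem.List.max?_id_cons]
      | some m =>
        cases hl : t.filter (fun o => decide (o ≤ cs)) with
        | nil => rw [hl] at hft; simp [PySem.List.max?] at hft
        | cons h' t' =>
          rw [hl] at hft
          have hoh : o ≤ h' := by
            have hmem : h' ∈ t.filter (fun o => decide (o ≤ cs)) := by
              rw [hl]; exact List.mem_cons_self
            exact le_of_lt (hp.1 h' (List.mem_of_mem_filter hmem))
          rw [PySem.List.max?_id_cons] at hft
          rw [PySem.List.max?_id_cons, List.foldl_cons, max_eq_right hoh, hft]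
    · simp only [goA, if_neg ho]
      rw [List.filter_cons_of_neg (by simpa using ho)]
      have hrest : t.filter (fun o' => decide (o' ≤ cs)) = [] := by
        rw [List.filter_eq_nil_iff]
        intro x hx
        simp only [decide_eq_true_eq]
        have : o < x := hp.1 x hx
        omega
      rw [hrest]
      simp [PySem.List.max?]

theorem sorted_keys_pairwise_lt (d : PySem.Dict Int String) (hnd : d.keys.Nodup) :
    (PySem.List.sorted d.keys (fun x => x) false).Pairwise (· < ·) := by
  have hle := PySem.List.sorted_pairwise d.keys (fun x => x)
  have hperm := PySem.List.sorted_perm d.keys (fun x => x) false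
  have hnd' : (PySem.List.sorted d.keys (fun x => x) false).Nodup := hperm.nodup_iff.mpr hnd
  have hne : (PySem.List.sorted d.keys (fun x => x) false).Pairwise (· ≠ ·) := hnd'
  exact (hle.and hne).imp (fun h => lt_of_le_of_ne h.1 h.2)

-- ===== VERDICT (by name: the statement is the Claim_ definition above) =====
theorem get_nearest_function_py_spec : Claim_equal_get_nearest_function_py := by
  intro full_text chunk_text func_dict _
  unfold Spec_get_nearest_function_py
  simp only [get_nearest_function_py, get_nearest_function_py_alt]
  have hnd : (PySem.Dict.ofList func_dict).keys.Nodup := PySem.Dict.nodup_keys_ofList func_dict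
  have hperm := PySem.List.sorted_perm (PySem.Dict.ofList func_dict).keys (fun x => x) false
  rw [goA_eq _ _ _ (sorted_keys_pairwise_lt _ hnd),
      max?_perm _ _ (hperm.filter _)]
  cases h : PySem.List.max? ((PySem.Dict.ofList func_dict).keys.filter
      (fun o => decide (o ≤ PySem.Str.find full_text (PySem.Str.slice chunk_text none (some 20)))))
      (fun x => x) with
  | none => rfl
  | some m =>
    exact getD_default_irrel _ m (List.mem_of_mem_filter (PySem.List.max?_mem h)) "" "unknown"
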